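-- pv_equiv track=rewrite | github.com/mhaoli/ACM-Source-Code | Problems/ProjectEuler/288.py | calc
-- ===== SOURCE A (Python) =====
-- def init_tn(n, mod):
--     s0 = 290797
--     sm = 50515093
--     tn = [s0 % mod]
--     while len(tn) < n:
--         s0 = s0 * s0 % sm
--         tn.append(s0 % mod)
--     return tn
--
-- def calc(p, n, mod):
--     tn = init_tn(n+1, p)
--     ans = 0
--     tmp = 0
--     i = len(tn) - 1
--     while i >= 1:
--         tmp = (tmp * p + tn[i]) % mod
--         ans = (ans + tmp) % mod
--         i -= 1
--     return ans
-- ===== SOURCE B (Python) =====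
-- def calc(p, n, mod):
--     # Forward single pass: maintain running Horner weight G_j = (G_{j-1}*p + 1) % mod
--     # and accumulate term_j * G_j; no list is stored.
--     s = 290797
--     g = 0
--     ans = 0
--     for _ in range(n):
--         s = s * s % 50515093
--         g = (g * p + 1) % mod
--         ans = (ans + (s % p) * g) % mod
--     return ans
-- ===== Notes on version B (the rewrite author's own statement) =====
-- stated objective: faster
-- what changed: Replaced A's build-the-whole-sequence-then-backward-Horner-pass with a single forward loop that generates each pseudo-random term on the fly and accumulates term*G with the running weight G = G*p + 1 (mod mod), storing no list.
import Mathlib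
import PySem

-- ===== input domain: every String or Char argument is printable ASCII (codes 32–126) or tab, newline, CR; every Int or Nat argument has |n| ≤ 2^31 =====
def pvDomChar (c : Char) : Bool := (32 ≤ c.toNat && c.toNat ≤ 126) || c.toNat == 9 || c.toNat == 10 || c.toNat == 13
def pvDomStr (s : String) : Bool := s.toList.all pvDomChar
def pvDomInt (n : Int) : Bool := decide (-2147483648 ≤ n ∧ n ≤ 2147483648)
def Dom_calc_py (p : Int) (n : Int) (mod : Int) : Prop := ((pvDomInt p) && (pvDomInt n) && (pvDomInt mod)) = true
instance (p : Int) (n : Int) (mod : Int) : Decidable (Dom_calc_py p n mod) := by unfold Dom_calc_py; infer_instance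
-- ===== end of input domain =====

-- B replaces A's stored pseudo-random list + backward Horner pass by one forward
-- streaming loop maintaining the running geometric weight (O(1) instead of O(n) space).


-- ===== PORT A =====
-- while len(tn) < n: s0 = s0*s0 % 50515093; tn.append(s0 % mod)
-- (fuel bounds the loop, the guard is the Python condition; Python's O(1) append/len are realised
--  by consing onto a reversed accumulator plus a length counter, reversed back on exit)
def initLoop (fuel : Nat) (s0 : Int) (n : Int) (m : Int) (len : Nat) (acc : List Int) : List Int :=
  match fuel with
  | 0 => acc.reverse
  | f + 1 =>
    if (len : Int) < n then
      let s0' := PySem.Int.mod (s0 * s0) 50515093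
      initLoop f s0' n m (len + 1) (PySem.Int.mod s0' m :: acc)
    else acc.reverse

def init_tn (n : Int) (m : Int) : List Int :=
  initLoop n.toNat 290797 n m 1 [PySem.Int.mod 290797 m]

-- while i >= 1: tmp = (tmp*p + tn[i]) % mod; ans = (ans + tmp) % mod; i -= 1
-- (i = len(tn)-1 ≥ 0, so the counter is a Nat; Python's O(1) read of tn[i] for i = len-1, len-2, …
--  is realised by walking tn.reverse, whose successive heads are exactly tn[len-1], tn[len-2], …;
--  the [] case is unreachable since i < len(tn))
def calcLoop (p : Int) (m : Int) : List Int → Nat → Int → Int → Int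
  | _, 0, _, ans => ans
  | [], _ + 1, _, ans => ans
  | x :: rest, i + 1, tmp, ans =>
    let tmp' := PySem.Int.mod (tmp * p + x) m
    calcLoop p m rest i tmp' (PySem.Int.mod (ans + tmp') m)

def calc_py (p : Int) (n : Int) (mod : Int) : Int :=
  let tn := init_tn (n + 1) p
  calcLoop p mod tn.reverse (tn.length - 1) 0 0

-- ===== PORT B =====
-- for _ in range(n): s = s*s % 50515093; g = (g*p+1) % mod; ans = (ans + (s % p)*g) % mod
def altLoop (p : Int) (m : Int) : Nat → Int → Int → Int → Int
  | 0, _, _, ans => ans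
  | k + 1, s, g, ans =>
    let s' := PySem.Int.mod (s * s) 50515093
    let g' := PySem.Int.mod (g * p + 1) m
    altLoop p m k s' g' (PySem.Int.mod (ans + PySem.Int.mod s' p * g') m)

def calc_py_alt (p : Int) (n : Int) (mod : Int) : Int :=
  altLoop p mod n.toNat 290797 0 0

-- ===== PRECONDITION & SPEC =====
-- A raises ZeroDivisionError when p = 0 (the '% p' on the first sequence term) and,
-- when n ≥ 1, also when mod = 0 (the '% mod' inside the summation loop); Pre_ excludes exactly those.
def Pre_calc_py (p : Int) (n : Int) (mod : Int) : Prop := p ≠ 0 ∧ (n ≤ 0 ∨ mod ≠ 0)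
instance (p : Int) (n : Int) (mod : Int) : Decidable (Pre_calc_py p n mod) := by unfold Pre_calc_py; infer_instance
def pvWitness_calc_py : Int × Int × Int := (7, 3, 10)

def Spec_calc_py (p : Int) (n : Int) (mod : Int) (out : Int) : Prop := out = calc_py_alt p n mod
instance (p : Int) (n : Int) (mod : Int) (out : Int) : Decidable (Spec_calc_py p n mod out) := by unfold Spec_calc_py; infer_instance

-- ===== CLAIM (what is proved, stated in full; the proofs are below) =====
def Claim_equal_calc_py : Prop := ∀ (p : Int) (n : Int) (mod : Int), Dom_calc_py p n mod → Pre_calc_py p n mod → Spec_calc_py p n mod (calc_py p n mod)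

-- ===== LEMMAS AND PROOFS =====

-- mod basics: PySem.Int.mod a m is congruent to a, and congruent arguments give equal mods
theorem pmDvd (a m : Int) : m ∣ (a - PySem.Int.mod a m) := by
  have h := PySem.Int.floordiv_mul_add_mod a m
  exact ⟨PySem.Int.floordiv a m, by linarith⟩

theorem pmModEq (a m : Int) : Int.ModEq m (PySem.Int.mod a m) a :=
  Int.modEq_iff_dvd.mpr (pmDvd a m)

theorem pmCongr {a b m : Int} (hm : m ≠ 0) (h : Int.ModEq m a b) :
    PySem.Int.mod a m = PySem.Int.mod b m := by
  rcases lt_or_gt_of_ne hm with hneg | hpos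
  · have e1 : PySem.Int.mod a m = -PySem.Int.mod (-a) (-m) := by
      have e := PySem.Int.mod_neg_neg (-a) (-m); simpa using e
    have e2 : PySem.Int.mod b m = -PySem.Int.mod (-b) (-m) := by
      have e := PySem.Int.mod_neg_neg (-b) (-m); simpa using e
    rw [e1, e2, neg_inj,
        PySem.Int.mod_eq_emod_of_pos (show (0:Int) < -m from by omega),
        PySem.Int.mod_eq_emod_of_pos (show (0:Int) < -m from by omega)]
    have hd := h.dvd
    exact Int.modEq_iff_dvd.mpr (by obtain ⟨k, hk⟩ := hd; exact ⟨k, by linarith⟩)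
  · rw [PySem.Int.mod_eq_emod_of_pos hpos, PySem.Int.mod_eq_emod_of_pos hpos]
    exact h

-- the common exact quantities: squared-chain step and iterate, front-iterated weight, exact weighted sum
def sqs (s : Int) : Int := PySem.Int.mod (s * s) 50515093

def siter (s : Int) : Nat → Int
  | 0 => s
  | k + 1 => siter (sqs s) k

def giter (p g : Int) : Nat → Int
  | 0 => g
  | k + 1 => giter p (g * p + 1) k

def Wsum (p : Int) : Nat → Int → Int → Int
  | 0, _, _ => 0
  | k + 1, s, g =>
    PySem.Int.mod (sqs s) p * (g * p + 1) + Wsum p k (sqs s) (g * p + 1)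

theorem giter_snoc (p : Int) (k : Nat) : ∀ g, giter p g (k + 1) = giter p g k * p + 1 := by
  induction k with
  | zero => intro g; simp [giter]
  | succ k ih => intro g; exact ih (g * p + 1)

theorem Wsum_congr (p m : Int) (k : Nat) : ∀ s g g', Int.ModEq m g g' →
    Int.ModEq m (Wsum p k s g) (Wsum p k s g') := by
  induction k with
  | zero => intro s g g' _; exact Int.ModEq.refl 0
  | succ k ih =>
    intro s g g' h
    have hg : Int.ModEq m (g * p + 1) (g' * p + 1) := (h.mul_right p).add_right 1
    exact ((Int.ModEq.refl (PySem.Int.mod (sqs s) p)).mul hg).add (ih (sqs s) _ _ hg)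

theorem Wsum_snoc (p : Int) (k : Nat) : ∀ s g,
    Wsum p (k + 1) s g = Wsum p k s g + PySem.Int.mod (siter s (k + 1)) p * giter p g (k + 1) := by
  induction k with
  | zero => intro s g; simp [Wsum, siter, giter]
  | succ k ih =>
    intro s g
    show PySem.Int.mod (sqs s) p * (g * p + 1) + Wsum p (k + 1) (sqs s) (g * p + 1)
        = (PySem.Int.mod (sqs s) p * (g * p + 1) + Wsum p k (sqs s) (g * p + 1))
          + PySem.Int.mod (siter s (k + 2)) p * giter p g (k + 2)
    rw [ih (sqs s) (g * p + 1),
        show siter s (k + 2) = siter (sqs s) (k + 1) from rfl,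
        show giter p g (k + 2) = giter p (g * p + 1) (k + 1) from rfl]
    ring

-- B's loop computes the reduced exact weighted sum
theorem altLoop_eq (p m : Int) (hm : m ≠ 0) (k : Nat) : ∀ s g ans,
    altLoop p m (k + 1) s g ans = PySem.Int.mod (ans + Wsum p (k + 1) s g) m := by
  induction k with
  | zero =>
    intro s g ans
    show PySem.Int.mod (ans + PySem.Int.mod (sqs s) p * PySem.Int.mod (g * p + 1) m) m
        = PySem.Int.mod (ans + Wsum p 1 s g) m
    apply pmCongr hm
    have H : Int.ModEq m (ans + PySem.Int.mod (sqs s) p * PySem.Int.mod (g * p + 1) m)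
        (ans + PySem.Int.mod (sqs s) p * (g * p + 1)) :=
      (Int.ModEq.refl ans).add ((Int.ModEq.refl _).mul (pmModEq (g * p + 1) m))
    have he : ans + PySem.Int.mod (sqs s) p * (g * p + 1) = ans + Wsum p 1 s g := by
      simp [Wsum]
    exact he ▸ H
  | succ k ih =>
    intro s g ans
    show altLoop p m (k + 1) (sqs s) (PySem.Int.mod (g * p + 1) m)
        (PySem.Int.mod (ans + PySem.Int.mod (sqs s) p * PySem.Int.mod (g * p + 1) m) m)
        = PySem.Int.mod (ans + Wsum p (k + 2) s g) m
    rw [ih]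
    apply pmCongr hm
    have hgm : Int.ModEq m (PySem.Int.mod (g * p + 1) m) (g * p + 1) := pmModEq _ m
    have H1 : Int.ModEq m
        (PySem.Int.mod (ans + PySem.Int.mod (sqs s) p * PySem.Int.mod (g * p + 1) m) m)
        (ans + PySem.Int.mod (sqs s) p * (g * p + 1)) :=
      (pmModEq _ m).trans ((Int.ModEq.refl ans).add ((Int.ModEq.refl _).mul hgm))
    have H2 := Wsum_congr p m (k + 1) (sqs s) _ _ hgm
    have H := H1.add H2
    have he : ans + PySem.Int.mod (sqs s) p * (g * p + 1) + Wsum p (k + 1) (sqs s) (g * p + 1)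
        = ans + Wsum p (k + 2) s g := by
      show _ = ans + (PySem.Int.mod (sqs s) p * (g * p + 1) + Wsum p (k + 1) (sqs s) (g * p + 1))
      ring
    exact he ▸ H

-- the list A builds: characterisation of the fueled while-loop
def chain (s m : Int) : Nat → List Int
  | 0 => []
  | k + 1 => PySem.Int.mod (sqs s) m :: chain (sqs s) m k

theorem chain_length (m : Int) (k : Nat) : ∀ s, (chain s m k).length = k := by
  induction k with
  | zero => intro s; rfl
  | succ k ih => intro s; simp [chain, ih]

theorem chain_snoc (m : Int) (k : Nat) : ∀ s,
    chain s m (k + 1) = chain s m k ++ [PySem.Int.mod (siter s (k + 1)) m] := by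
  induction k with
  | zero => intro s; simp [chain, siter]
  | succ k ih =>
    intro s
    show PySem.Int.mod (sqs s) m :: chain (sqs s) m (k + 1)
        = (PySem.Int.mod (sqs s) m :: chain (sqs s) m k) ++ [PySem.Int.mod (siter s (k + 2)) m]
    rw [ih (sqs s)]
    rfl

theorem initLoop_eq (n m : Int) (fuel : Nat) : ∀ s (acc : List Int), n - acc.length ≤ fuel →
    initLoop fuel s n m acc.length acc = acc.reverse ++ chain s m (n - acc.length).toNat := by
  induction fuel with
  | zero =>
    intro s acc h
    have h0 : (n - (acc.length : Int)).toNat = 0 := by omega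
    simp [initLoop, h0, chain]
  | succ f ih =>
    intro s acc h
    by_cases hc : ((acc.length : Nat) : Int) < n
    · rw [show initLoop (f + 1) s n m acc.length acc
          = initLoop f (sqs s) n m (acc.length + 1) (PySem.Int.mod (sqs s) m :: acc) from by
            simp [initLoop, hc, sqs]]
      rw [show acc.length + 1 = (PySem.Int.mod (sqs s) m :: acc).length from rfl,
          ih (sqs s) _ (by simp; omega)]
      rw [show (n - ((acc.length : Nat) : Int)).toNat
          = (n - (((PySem.Int.mod (sqs s) m :: acc).length : Nat) : Int)).toNat + 1 from by simp; omega,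
          chain]
      simp
    · have h0 : (n - (acc.length : Int)).toNat = 0 := by omega
      simp [initLoop, hc, h0, chain]

-- A's backward loop: closed form over the exact sum
-- (the remaining reversed list at counter i+1 is the reverse of the first i+2 terms)
theorem calcLoop_eq (p m : Int) (hm : m ≠ 0) : ∀ (i : Nat) (tmp ans : Int),
    calcLoop p m ((PySem.Int.mod 290797 p :: chain 290797 p (i + 1)).reverse) (i + 1) tmp ans
      = PySem.Int.mod (ans + tmp * (giter p 0 (i + 2) - 1) + Wsum p (i + 1) 290797 0) m := by
  intro i
  induction i with
  | zero =>
    intro tmp ans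
    rw [show (PySem.Int.mod 290797 p :: chain 290797 p 1).reverse
        = [PySem.Int.mod (sqs 290797) p, PySem.Int.mod 290797 p] from by simp [chain]]
    show PySem.Int.mod (ans + PySem.Int.mod (tmp * p + PySem.Int.mod (sqs 290797) p) m) m = _
    apply pmCongr hm
    have H : Int.ModEq m (ans + PySem.Int.mod (tmp * p + PySem.Int.mod (sqs 290797) p) m)
        (ans + (tmp * p + PySem.Int.mod (sqs 290797) p)) :=
      (Int.ModEq.refl ans).add (pmModEq _ m)
    have he : ans + (tmp * p + PySem.Int.mod (sqs 290797) p)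
        = ans + tmp * (giter p 0 2 - 1) + Wsum p 1 290797 0 := by
      show _ = ans + tmp * ((0 * p + 1) * p + 1 - 1)
          + (PySem.Int.mod (sqs 290797) p * (0 * p + 1) + 0)
      ring
    exact he ▸ H
  | succ i ih =>
    intro tmp ans
    rw [show (PySem.Int.mod 290797 p :: chain 290797 p (i + 2)).reverse
        = PySem.Int.mod (siter 290797 (i + 2)) p
          :: (PySem.Int.mod 290797 p :: chain 290797 p (i + 1)).reverse from by
        rw [chain_snoc p (i + 1) 290797]; simp]
    show calcLoop p m ((PySem.Int.mod 290797 p :: chain 290797 p (i + 1)).reverse) (i + 1)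
        (PySem.Int.mod (tmp * p + PySem.Int.mod (siter 290797 (i + 2)) p) m)
        (PySem.Int.mod (ans + PySem.Int.mod (tmp * p + PySem.Int.mod (siter 290797 (i + 2)) p) m) m)
        = _
    rw [ih _ _]
    apply pmCongr hm
    set t := PySem.Int.mod (siter 290797 (i + 2)) p with ht
    have Htmp : Int.ModEq m (PySem.Int.mod (tmp * p + t) m) (tmp * p + t) := pmModEq _ m
    have Hans : Int.ModEq m (PySem.Int.mod (ans + PySem.Int.mod (tmp * p + t) m) m)
        (ans + (tmp * p + t)) := (pmModEq _ m).trans ((Int.ModEq.refl ans).add Htmp)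
    have H := (Hans.add (Htmp.mul_right (giter p 0 (i + 2) - 1))).add
      (Int.ModEq.refl (Wsum p (i + 1) 290797 0))
    have hWs : Wsum p (i + 2) 290797 0 = Wsum p (i + 1) 290797 0 + t * giter p 0 (i + 2) := by
      rw [Wsum_snoc p (i + 1) 290797 0]
    have hG : giter p 0 (i + 3) = giter p 0 (i + 2) * p + 1 := giter_snoc p (i + 2) 0
    have he : ans + (tmp * p + t) + (tmp * p + t) * (giter p 0 (i + 2) - 1) + Wsum p (i + 1) 290797 0
        = ans + tmp * (giter p 0 (i + 3) - 1) + Wsum p (i + 2) 290797 0 := by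
      rw [hWs, hG]; ring
    exact he ▸ H

-- the final assembly
theorem calc_eq_alt (p n m : Int) (_hp : p ≠ 0) (hnm : n ≤ 0 ∨ m ≠ 0) :
    calc_py p n m = calc_py_alt p n m := by
  have htn : init_tn (n + 1) p
      = PySem.Int.mod 290797 p :: chain 290797 p n.toNat := by
    show initLoop (n + 1).toNat 290797 (n + 1) p ([PySem.Int.mod 290797 p].length)
        [PySem.Int.mod 290797 p] = _
    rw [initLoop_eq (n + 1) p (n + 1).toNat 290797 _ (by simp)]
    rw [show ((n + 1 - (([PySem.Int.mod 290797 p].length : Nat) : Int)).toNat) = n.toNat from by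
      simp]
    rfl
  have hA : calc_py p n m
      = calcLoop p m (init_tn (n + 1) p).reverse ((init_tn (n + 1) p).length - 1) 0 0 := rfl
  have hB : calc_py_alt p n m = altLoop p m n.toNat 290797 0 0 := rfl
  by_cases hn : n ≤ 0
  · -- n ≤ 0: both loops are empty
    have h0 : n.toNat = 0 := by omega
    rw [hA, hB, htn, h0]
    simp [chain, calcLoop, altLoop]
  · -- n ≥ 1
    have hm : m ≠ 0 := hnm.resolve_left (by omega)
    have hN : n.toNat = (n.toNat - 1) + 1 := by omega
    have hlen : (init_tn (n + 1) p).length - 1 = n.toNat := by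
      rw [htn]; simp [chain_length]
    rw [hA, hB, hlen, htn, hN,
        calcLoop_eq p m hm (n.toNat - 1) 0 0,
        altLoop_eq p m hm (n.toNat - 1) 290797 0 0]
    congr 1
    ring

-- ===== VERDICT (by name: the statement is the Claim_ definition above) =====
theorem calc_py_spec : Claim_equal_calc_py := by
  intro p n m _ hpre
  unfold Spec_calc_py
  exact calc_eq_alt p n m hpre.1 hpre.2
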